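-- pv_equiv track=rewrite | github.com/minonath/gugu | gu/system/png.py | t_palette_to_rgb
-- ===== SOURCE A (Python) =====
-- def t_palette_to_rgb(data, palette, alpha, background):
--     br, bg, bb = palette[background]
--     for m in data:
--         rr, rg, rb = palette[m]
--         ra = alpha[m]
--         yield br + (rr - br) * ra // 255
--         yield bg + (rg - bg) * ra // 255
--         yield bb + (rb - bb) * ra // 255
-- ===== SOURCE B (Python) =====
-- def t_palette_to_rgb(data, palette, alpha, background):
--     # Staged channel-major passes: build the red, green and blue streams
--     # separately, then interleave them pixel by pixel.
--     br, bg, bb = palette[background]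
--     reds   = [br + (palette[m][0] - br) * alpha[m] // 255 for m in data]
--     greens = [bg + (palette[m][1] - bg) * alpha[m] // 255 for m in data]
--     blues  = [bb + (palette[m][2] - bb) * alpha[m] // 255 for m in data]
--     for t in zip(reds, greens, blues):
--         yield from t
-- ===== Notes on version B (the rewrite author's own statement) =====
-- stated objective: alternative
-- what changed: B replaces A's single pixel-major pass (three yields per element) by three staged channel-major passes building the red, green and blue streams as separate lists, then interleaves them with zip; correct because each channel value depends only on its own pixel index, so the per-channel lists are aligned and zip restores pixel order.
import Mathlib
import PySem

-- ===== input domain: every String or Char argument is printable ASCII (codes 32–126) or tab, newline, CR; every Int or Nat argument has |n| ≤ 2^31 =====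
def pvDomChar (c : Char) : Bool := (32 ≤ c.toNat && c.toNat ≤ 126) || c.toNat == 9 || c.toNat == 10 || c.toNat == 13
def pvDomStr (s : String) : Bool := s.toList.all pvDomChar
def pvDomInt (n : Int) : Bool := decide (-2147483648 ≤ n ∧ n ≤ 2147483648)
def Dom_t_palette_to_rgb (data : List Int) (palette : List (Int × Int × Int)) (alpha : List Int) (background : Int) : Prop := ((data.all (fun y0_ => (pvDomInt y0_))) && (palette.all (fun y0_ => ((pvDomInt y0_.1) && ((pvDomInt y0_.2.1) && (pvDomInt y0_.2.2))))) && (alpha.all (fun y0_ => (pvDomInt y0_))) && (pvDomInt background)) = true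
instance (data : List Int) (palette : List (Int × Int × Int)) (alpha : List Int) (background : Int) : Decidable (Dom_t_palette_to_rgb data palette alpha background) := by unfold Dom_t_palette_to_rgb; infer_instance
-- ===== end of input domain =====

-- B replaces A's single pixel-major pass by three staged channel-major passes (one list per
-- colour channel) interleaved with zip; equivalence of the RETURN value only (both are generators).

-- ===== PORT A =====
def t_palette_to_rgb (data : List Int) (palette : List (Int × Int × Int)) (alpha : List Int) (background : Int) : List Int :=
  match PySem.List.pyGet? palette background with
  | none => []  -- IndexError, excluded by Pre_
  | some (br, bg, bb) =>
    data.foldl (fun acc m =>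
      match PySem.List.pyGet? palette m, PySem.List.pyGet? alpha m with
      | some (rr, rg, rb), some ra =>
        acc ++ [br + PySem.Int.floordiv ((rr - br) * ra) 255,
                bg + PySem.Int.floordiv ((rg - bg) * ra) 255,
                bb + PySem.Int.floordiv ((rb - bb) * ra) 255]
      | _, _ => acc) []  -- IndexError, excluded by Pre_

-- ===== PORT B =====
-- One channel-major pass: the list comprehension for one colour channel (sel picks the channel).
def pvChan (palette : List (Int × Int × Int)) (alpha : List Int) (sel : Int × Int × Int → Int) (base : Int) : List Int → List Int
  | [] => []
  | m :: rest =>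
    (PySem.List.pyGet? palette m).elim (pvChan palette alpha sel base rest)  -- none: IndexError, excluded by Pre_
      (fun p => (PySem.List.pyGet? alpha m).elim (pvChan palette alpha sel base rest)  -- none: IndexError, excluded by Pre_
        (fun ra => (base + PySem.Int.floordiv ((sel p - base) * ra) 255) :: pvChan palette alpha sel base rest))

def t_palette_to_rgb_alt (data : List Int) (palette : List (Int × Int × Int)) (alpha : List Int) (background : Int) : List Int :=
  (PySem.List.pyGet? palette background).elim
    []  -- IndexError, excluded by Pre_
    (fun bgc =>
    let reds := pvChan palette alpha (·.1) bgc.1 data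
    let greens := pvChan palette alpha (·.2.1) bgc.2.1 data
    let blues := pvChan palette alpha (·.2.2) bgc.2.2 data
    (reds.zip (greens.zip blues)).flatMap (fun t => [t.1, t.2.1, t.2.2]))

-- ===== PRECONDITION & SPEC =====
-- Pre_ excludes exactly the inputs where Python A raises IndexError: background or some
-- element of data out of (negative-wrapping) range for palette or alpha.
def Pre_t_palette_to_rgb (data : List Int) (palette : List (Int × Int × Int)) (alpha : List Int) (background : Int) : Prop :=
  PySem.Raise.InRange palette.length background ∧
  ∀ m ∈ data, PySem.Raise.InRange palette.length m ∧ PySem.Raise.InRange alpha.length m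
instance (data : List Int) (palette : List (Int × Int × Int)) (alpha : List Int) (background : Int) : Decidable (Pre_t_palette_to_rgb data palette alpha background) := by unfold Pre_t_palette_to_rgb; infer_instance

def pvWitness_t_palette_to_rgb : List Int × (List (Int × Int × Int)) × List Int × Int :=
  ([0, 1, 0], [(10, 20, 30), (200, 100, 0)], [255, 128], 0)

def Spec_t_palette_to_rgb (data : List Int) (palette : List (Int × Int × Int)) (alpha : List Int) (background : Int) (out : List Int) : Prop := out = t_palette_to_rgb_alt data palette alpha background
instance (data : List Int) (palette : List (Int × Int × Int)) (alpha : List Int) (background : Int) (out : List Int) : Decidable (Spec_t_palette_to_rgb data palette alpha background out) := by unfold Spec_t_palette_to_rgb; infer_instance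

-- ===== CLAIM (what is proved, stated in full; the proofs are below) =====
def Claim_equal_t_palette_to_rgb : Prop := ∀ (data : List Int) (palette : List (Int × Int × Int)) (alpha : List Int) (background : Int), Dom_t_palette_to_rgb data palette alpha background → Pre_t_palette_to_rgb data palette alpha background → Spec_t_palette_to_rgb data palette alpha background (t_palette_to_rgb data palette alpha background)

-- ===== LEMMAS AND PROOFS =====

-- Core: A's single fold equals the interleaving of B's three channel lists.
-- (Elements on which both lookups fail are dropped by all three channel lists in sync,
-- so the zip stays aligned; the lemma needs no precondition.)
theorem pvLoop_eq (palette : List (Int × Int × Int)) (alpha : List Int) (br bg bb : Int) :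
    ∀ (data : List Int) (acc : List Int),
      data.foldl (fun acc m =>
        match PySem.List.pyGet? palette m, PySem.List.pyGet? alpha m with
        | some (rr, rg, rb), some ra =>
          acc ++ [br + PySem.Int.floordiv ((rr - br) * ra) 255,
                  bg + PySem.Int.floordiv ((rg - bg) * ra) 255,
                  bb + PySem.Int.floordiv ((rb - bb) * ra) 255]
        | _, _ => acc) acc
      = acc ++ ((pvChan palette alpha (·.1) br data).zip
          ((pvChan palette alpha (·.2.1) bg data).zip (pvChan palette alpha (·.2.2) bb data))).flatMap
            (fun t => [t.1, t.2.1, t.2.2]) := by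
  intro data
  induction data with
  | nil => intro acc; simp [pvChan]
  | cons m rest ih =>
    intro acc
    simp only [List.foldl_cons, pvChan]
    rcases hp : PySem.List.pyGet? palette m with _ | ⟨rr, rg, rb⟩
    · simpa [Option.elim] using ih acc
    rcases ha : PySem.List.pyGet? alpha m with _ | ra
    · simpa [Option.elim] using ih acc
    simp only [Option.elim, List.zip_cons_cons, List.flatMap_cons, ih]
    simp

-- ===== VERDICT (by name: the statement is the Claim_ definition above) =====
theorem t_palette_to_rgb_spec : Claim_equal_t_palette_to_rgb := by
  intro data palette alpha background _ _
  unfold Spec_t_palette_to_rgb t_palette_to_rgb t_palette_to_rgb_alt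
  rcases hbg : PySem.List.pyGet? palette background with _ | ⟨br, bg, bb⟩
  · rfl
  · simpa using pvLoop_eq palette alpha br bg bb data []
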